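-- pv_equiv track=rewrite | github.com/awaldis/workout-creator | exercise_database.py | join_sets
-- ===== SOURCE A (Python) =====
-- from typing import List, Optional
--
-- def join_sets(weights: List[int], reps: List[int]) -> str:
--     parts = []
--     prev_weight = None
--     for w, r in zip(weights, reps):
--         if prev_weight is None or w != prev_weight:
--             parts.append(f"{w}# × {r}")
--         else:
--             parts.append(str(r))
--         prev_weight = w
--     return ', '.join(parts)
-- ===== SOURCE B (Python) =====
-- def join_sets(weights, reps):
--     pairs = list(zip(weights, reps))
--     n = len(pairs)
--     parts = []
--     i = 0
--     while i < n:
--         w, r = pairs[i]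
--         parts.append(f"{w}# × {r}")
--         j = i + 1
--         while j < n and pairs[j][0] == w:
--             parts.append(str(pairs[j][1]))
--             j += 1
--         i = j
--     return ', '.join(parts)
-- ===== Notes on version B (the rewrite author's own statement) =====
-- stated objective: alternative
-- what changed: Replaces A's flat stateful scan with a prev_weight sentinel by an outer loop over runs of equal weight with an inner loop emitting the run's remaining reps; no sentinel state.
import Mathlib
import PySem

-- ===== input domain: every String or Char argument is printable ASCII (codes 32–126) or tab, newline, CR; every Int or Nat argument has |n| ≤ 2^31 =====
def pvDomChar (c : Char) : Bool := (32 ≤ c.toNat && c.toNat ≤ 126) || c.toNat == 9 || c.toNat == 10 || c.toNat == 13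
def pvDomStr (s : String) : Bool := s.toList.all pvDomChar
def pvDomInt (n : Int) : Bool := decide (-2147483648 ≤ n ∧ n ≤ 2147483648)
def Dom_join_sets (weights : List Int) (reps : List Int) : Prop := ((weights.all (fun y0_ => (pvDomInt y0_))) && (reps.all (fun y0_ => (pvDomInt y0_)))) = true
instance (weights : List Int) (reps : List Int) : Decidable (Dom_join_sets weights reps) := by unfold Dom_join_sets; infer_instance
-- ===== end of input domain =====

-- B replaces A's flat scan with a prev_weight sentinel by a run-structured loop (outer loop
-- over runs of equal weight, inner loop over the run's remaining members); same O(n) cost.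


-- f"{w}# × {r}"
def fmtSet (w r : Int) : String := PySem.Int.toStr w ++ "# × " ++ PySem.Int.toStr r

-- ===== PORT A =====
-- fold over zip(weights, reps) carrying (parts, prev_weight), exactly A's loop;
-- 'prev_weight is None or w != prev_weight' is the test 'st.2 ≠ some p.1'
def join_sets (weights : List Int) (reps : List Int) : String :=
  PySem.Str.join ", "
    ((weights.zip reps).foldl
      (fun (st : List String × Option Int) p =>
        if st.2 ≠ some p.1 then (st.1 ++ [fmtSet p.1 p.2], some p.1)
        else (st.1 ++ [PySem.Int.toStr p.2], some p.1))
      ([], none)).1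

-- ===== PORT B =====
-- outer recursion over runs of equal weight (the inner while loop = takeWhile/dropWhile)
def join_sets_altGo : List (Int × Int) → List String
  | [] => []
  | (w, r) :: rest =>
    fmtSet w r ::
      ((rest.takeWhile (fun p => p.1 == w)).map (fun p => PySem.Int.toStr p.2) ++
        join_sets_altGo (rest.dropWhile (fun p => p.1 == w)))
termination_by l => l.length
decreasing_by
  simp only [List.length_cons]
  exact Nat.lt_succ_of_le (List.length_dropWhile_le _ _)

def join_sets_alt (weights : List Int) (reps : List Int) : String :=
  PySem.Str.join ", " (join_sets_altGo (weights.zip reps))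

-- ===== PRECONDITION & SPEC =====
def Spec_join_sets (weights : List Int) (reps : List Int) (out : String) : Prop := out = join_sets_alt weights reps
instance (weights : List Int) (reps : List Int) (out : String) : Decidable (Spec_join_sets weights reps out) := by unfold Spec_join_sets; infer_instance

-- ===== CLAIM (what is proved, stated in full; the proofs are below) =====
def Claim_equal_join_sets : Prop := ∀ (weights : List Int) (reps : List Int), Dom_join_sets weights reps → Spec_join_sets weights reps (join_sets weights reps)

-- ===== LEMMAS AND PROOFS =====

-- the element A's loop emits for pair p given the previous weight
def aEmit (prev : Option Int) (p : Int × Int) : String :=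
  if prev ≠ some p.1 then fmtSet p.1 p.2 else PySem.Int.toStr p.2

-- the parts A's loop emits from a given prev_weight, without the accumulated prefix
def aParts : Option Int → List (Int × Int) → List String
  | _, [] => []
  | prev, p :: rest => aEmit prev p :: aParts (some p.1) rest

theorem step_eq :
    (fun (st : List String × Option Int) (p : Int × Int) =>
        if st.2 ≠ some p.1 then (st.1 ++ [fmtSet p.1 p.2], some p.1)
        else (st.1 ++ [PySem.Int.toStr p.2], some p.1)) =
      (fun st p => (st.1 ++ [aEmit st.2 p], some p.1)) := by
  funext st p
  unfold aEmit
  split_ifs <;> rfl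

theorem foldl_aParts (l : List (Int × Int)) (parts : List String) (prev : Option Int) :
    (l.foldl (fun (st : List String × Option Int) p => (st.1 ++ [aEmit st.2 p], some p.1))
      (parts, prev)).1 = parts ++ aParts prev l := by
  induction l generalizing parts prev with
  | nil => simp [aParts]
  | cons p rest ih => simp [List.foldl_cons, ih, aParts]

theorem altGo_nil : join_sets_altGo [] = [] := by
  rw [join_sets_altGo]

theorem altGo_cons (w r : Int) (rest : List (Int × Int)) :
    join_sets_altGo ((w, r) :: rest) =
      fmtSet w r ::
        ((rest.takeWhile (fun p => p.1 == w)).map (fun p => PySem.Int.toStr p.2) ++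
          join_sets_altGo (rest.dropWhile (fun p => p.1 == w))) := by
  rw [join_sets_altGo]

theorem aParts_some (l : List (Int × Int)) (w : Int) :
    aParts (some w) l =
      (l.takeWhile (fun p => p.1 == w)).map (fun p => PySem.Int.toStr p.2) ++
        join_sets_altGo (l.dropWhile (fun p => p.1 == w)) := by
  induction l generalizing w with
  | nil => simp [aParts, altGo_nil]
  | cons p rest ih =>
    cases p with
    | mk w' r' =>
      by_cases h : w' = w
      · subst h
        simp [aParts, aEmit, ih]
      · simp only [List.takeWhile_cons, List.dropWhile_cons, show ((w' == w) = false) by simp [h],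
          Bool.false_eq_true, if_false, List.map_nil, List.nil_append]
        rw [altGo_cons]
        simp [aParts, aEmit, ih w']
        intro hw
        exact absurd hw.symm h

theorem aParts_none (l : List (Int × Int)) : aParts none l = join_sets_altGo l := by
  cases l with
  | nil => simp [aParts, altGo_nil]
  | cons p rest =>
    cases p with
    | mk w r =>
      rw [altGo_cons]
      simp [aParts, aEmit, aParts_some]

-- ===== VERDICT (by name: the statement is the Claim_ definition above) =====
theorem join_sets_spec : Claim_equal_join_sets := by
  intro weights reps _
  unfold Spec_join_sets join_sets join_sets_alt
  rw [step_eq, foldl_aParts, aParts_none]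
  simp
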